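-- pv_equiv track=rewrite | github.com/kelvincjr/contest_2024 | ccf_bdci/code/retrieval_main.py | calculate_ngram_overlap
-- ===== SOURCE A (Python) =====
-- from collections import Counter
-- from typing import List
--
-- def extract_ngrams(text: str, n: int) -> List[str]:
--     words = list(text)
--     return [' '.join(words[i:i+n]) for i in range(len(words)-n+1)]
--
-- def calculate_ngram_overlap(reference: str, generated: str, n: int):
--     reference_ngrams = extract_ngrams(reference, n)
--     generated_ngrams = extract_ngrams(generated, n)
--
--     reference_counter = Counter(reference_ngrams)
--     generated_counter = Counter(generated_ngrams)
--
--     overlapping_ngrams = set(reference_counter.keys()) & set(generated_counter.keys())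
--     overlap_count = sum(min(reference_counter[ngram], generated_counter[ngram]) for ngram in overlapping_ngrams)
--     gen_ngrams_count = len(generated_ngrams)
--
--     score = overlap_count
--
--     return score
-- ===== SOURCE B (Python) =====
-- from collections import Counter
-- from typing import List
--
-- def extract_ngrams(text: str, n: int) -> List[str]:
--     words = list(text)
--     return [' '.join(words[i:i+n]) for i in range(len(words)-n+1)]
--
-- def calculate_ngram_overlap(reference: str, generated: str, n: int):
--     remaining = Counter(extract_ngrams(reference, n))
--     overlap_count = 0
--     for ngram in extract_ngrams(generated, n):
--         if remaining[ngram] > 0: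
--             overlap_count += 1
--             remaining[ngram] -= 1
--     return overlap_count
-- ===== Notes on version B (the rewrite author's own statement) =====
-- stated objective: alternative
-- what changed: Replaces A's two Counters + set intersection + sum of per-key minima with a single consuming pass over one reference Counter (decrement-on-hit), proved equal via the multiset-intersection cardinality.
import Mathlib
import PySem

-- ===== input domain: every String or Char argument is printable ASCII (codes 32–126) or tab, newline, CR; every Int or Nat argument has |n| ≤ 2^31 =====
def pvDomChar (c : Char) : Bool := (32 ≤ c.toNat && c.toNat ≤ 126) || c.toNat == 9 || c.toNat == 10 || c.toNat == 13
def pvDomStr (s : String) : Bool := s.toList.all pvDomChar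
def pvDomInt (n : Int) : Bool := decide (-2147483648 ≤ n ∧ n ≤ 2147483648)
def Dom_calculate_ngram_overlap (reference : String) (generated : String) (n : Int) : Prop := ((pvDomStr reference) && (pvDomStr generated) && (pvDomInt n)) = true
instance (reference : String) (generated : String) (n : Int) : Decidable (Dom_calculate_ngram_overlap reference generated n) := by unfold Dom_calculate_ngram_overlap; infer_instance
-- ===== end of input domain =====

-- B replaces A's two-Counter + set-intersection + sum-of-minima with a single consuming
-- pass over one reference Counter (alternative decomposition, same asymptotic cost).

-- ===== PORT A =====
-- helper shared verbatim by Source A and Source B: extract_ngrams(text, n)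
def extract_ngrams (text : String) (n : Int) : List String :=
  let words := text.toList
  (PySem.List.pyRange 0 ((words.length : Int) - n + 1) 1).map (fun i =>
    PySem.Str.join " " ((PySem.List.slice words (some i) (some (i + n))).map (fun c => String.ofList [c])))

def calculate_ngram_overlap (reference : String) (generated : String) (n : Int) : Int :=
  let reference_ngrams := extract_ngrams reference n
  let generated_ngrams := extract_ngrams generated n
  let reference_counter := PySem.Dict.counter reference_ngrams
  let generated_counter := PySem.Dict.counter generated_ngrams
  let overlapping_ngrams := PySem.Set.inter (PySem.Set.ofList reference_counter.keys) (PySem.Set.ofList generated_counter.keys)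
  let overlap_count := (overlapping_ngrams.map (fun ngram => min (reference_counter.getD ngram 0) (generated_counter.getD ngram 0))).sum
  let score := overlap_count
  score

-- ===== PORT B =====
def calculate_ngram_overlap_alt (reference : String) (generated : String) (n : Int) : Int :=
  let remaining := PySem.Dict.counter (extract_ngrams reference n)
  let final := (extract_ngrams generated n).foldl
    (fun (st : Int × PySem.Dict String Int) ngram =>
      if st.2.getD ngram 0 > 0 then (st.1 + 1, st.2.modify ngram 0 (· - 1)) else st)
    (0, remaining)
  final.1

-- ===== PRECONDITION & SPEC =====
def Spec_calculate_ngram_overlap (reference : String) (generated : String) (n : Int) (out : Int) : Prop := out = calculate_ngram_overlap_alt reference generated n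
instance (reference : String) (generated : String) (n : Int) (out : Int) : Decidable (Spec_calculate_ngram_overlap reference generated n out) := by unfold Spec_calculate_ngram_overlap; infer_instance

-- ===== CLAIM (what is proved, stated in full; the proofs are below) =====
def Claim_equal_calculate_ngram_overlap : Prop := ∀ (reference : String) (generated : String) (n : Int), Dom_calculate_ngram_overlap reference generated n → Spec_calculate_ngram_overlap reference generated n (calculate_ngram_overlap reference generated n)

-- ===== LEMMAS AND PROOFS =====

-- casting a Nat list sum into Int elementwise
theorem cast_sum_list (l : List ℕ) : (List.map (fun m : ℕ => (m : Int)) l).sum = ((l.sum : ℕ) : Int) := by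
  induction l with
  | nil => simp
  | cons x xs ih =>
      simp only [List.map_cons, List.sum_cons, ih, Nat.cast_add]

-- sum of a function over a Nodup list = the Finset sum over its toFinset
theorem sum_map_nodup_eq_finset_sum {α : Type} [DecidableEq α] (L : List α) (h : L.Nodup)
    (f : α → ℕ) : (L.map f).sum = ∑ a ∈ L.toFinset, f a := by
  induction L with
  | nil => simp
  | cons x xs ih =>
      rcases List.nodup_cons.mp h with ⟨hx, hxs⟩
      rw [List.map_cons, List.sum_cons, ih hxs, List.toFinset_cons,
        Finset.sum_insert (by simp [hx])]

-- A's sum of per-key minima over the key intersection = card of the multiset intersection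
theorem a_core (rs gs : List String) :
    ((PySem.Set.inter (PySem.Set.ofList rs) (PySem.Set.ofList gs)).map
      (fun k => min ((rs.count k : Int)) ((gs.count k : Int)))).sum
    = (((rs : Multiset String) ∩ (gs : Multiset String)).card : Int) := by
  set L := PySem.Set.inter (PySem.Set.ofList rs) (PySem.Set.ofList gs) with hL
  have hnd : L.Nodup := PySem.Set.nodup_inter _ _ (PySem.Set.nodup_ofList rs)
  have hmem : ∀ k, k ∈ L ↔ k ∈ rs ∧ k ∈ gs := by
    intro k
    simp [hL, PySem.Set.mem_inter, PySem.Set.mem_ofList]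
  have hf : (fun k => min ((rs.count k : Int)) ((gs.count k : Int)))
      = (fun m : ℕ => (m : Int)) ∘ (fun k => min (rs.count k) (gs.count k)) := by
    funext k
    simp [Function.comp, Nat.cast_min]
  rw [hf, ← List.map_map, cast_sum_list]
  norm_cast
  rw [sum_map_nodup_eq_finset_sum L hnd]
  have hfin : L.toFinset = ((rs : Multiset String) ∩ (gs : Multiset String)).toFinset := by
    ext a
    simp [List.mem_toFinset, hmem]
  rw [← Multiset.toFinset_sum_count_eq (((rs : Multiset String) ∩ (gs : Multiset String))), ← hfin]
  apply Finset.sum_congr rfl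
  intro a _
  simp [Multiset.coe_count]

-- B's consuming loop, abstracted to a count function
def bLoop (c : String → ℕ) : List String → ℕ
  | [] => 0
  | g :: gs => if 0 < c g then bLoop (fun k => if k = g then c g - 1 else c k) gs + 1 else bLoop c gs

theorem bLoop_eq_card (gs : List String) (m : Multiset String) :
    bLoop (fun k => m.count k) gs = (((gs : List String) : Multiset String) ∩ m).card := by
  induction gs generalizing m with
  | nil => simp [bLoop]
  | cons g gs ih =>
      by_cases hg : g ∈ m
      · have hpos : 0 < m.count g := Multiset.count_pos.mpr hg
        have hfun : (fun k => if k = g then m.count g - 1 else m.count k)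
            = fun k => (m.erase g).count k := by
          funext k
          by_cases hk : k = g
          · simp [hk, Multiset.count_erase_self]
          · simp [hk, Multiset.count_erase_of_ne hk]
        have hco : ((g :: gs : List String) : Multiset String) = g ::ₘ (gs : Multiset String) := rfl
        rw [hco, Multiset.cons_inter_of_pos _ hg, Multiset.card_cons]
        simp only [bLoop, if_pos hpos, hfun, ih]
      · have hz : ¬ 0 < m.count g := by simp [Multiset.count_eq_zero_of_notMem hg]
        have hco : ((g :: gs : List String) : Multiset String) = g ::ₘ (gs : Multiset String) := rfl
        rw [hco, Multiset.cons_inter_of_neg _ hg]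
        simp only [bLoop, if_neg hz, ih]

theorem fold_eq_bLoop (gs : List String) (acc : Int) (d : PySem.Dict String Int)
    (hnn : ∀ k, 0 ≤ d.getD k 0) :
    (gs.foldl (fun (st : Int × PySem.Dict String Int) ngram =>
        if st.2.getD ngram 0 > 0 then (st.1 + 1, st.2.modify ngram 0 (· - 1)) else st)
      (acc, d)).1
    = acc + (bLoop (fun k => (d.getD k 0).toNat) gs : Int) := by
  induction gs generalizing acc d with
  | nil => simp [bLoop]
  | cons g gs ih =>
      by_cases hg : d.getD g 0 > 0
      · have hnn' : ∀ k, 0 ≤ (d.modify g 0 (· - 1)).getD k 0 := by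
          intro k
          rw [PySem.Dict.getD_modify]
          split_ifs with hk
          · omega
          · exact hnn k
        have hcfun : (fun k => ((d.modify g 0 (· - 1)).getD k 0).toNat)
            = fun k => if k = g then (d.getD g 0).toNat - 1 else (d.getD k 0).toNat := by
          funext k
          rw [PySem.Dict.getD_modify]
          split_ifs with hk <;> omega
        have hposn : 0 < (d.getD g 0).toNat := by omega
        simp only [List.foldl_cons, if_pos hg, ih (acc + 1) _ hnn', hcfun,
          bLoop, if_pos hposn]
        push_cast
        ring
      · have hzn : ¬ 0 < (d.getD g 0).toNat := by
          have := hnn g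
          omega
        simp only [List.foldl_cons, if_neg hg, ih acc d hnn, bLoop, if_neg hzn]

-- the two cores agree on any pair of n-gram lists
theorem core_eq (rs gs : List String) :
    ((PySem.Set.inter (PySem.Set.ofList rs) (PySem.Set.ofList gs)).map
      (fun k => min ((rs.count k : Int)) ((gs.count k : Int)))).sum
    = (gs.foldl (fun (st : Int × PySem.Dict String Int) ngram =>
        if st.2.getD ngram 0 > 0 then (st.1 + 1, st.2.modify ngram 0 (· - 1)) else st)
      (0, PySem.Dict.counter rs)).1 := by
  have hnn : ∀ k, 0 ≤ (PySem.Dict.counter rs).getD k 0 := by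
    intro k
    rw [PySem.Dict.getD_counter]
    positivity
  rw [fold_eq_bLoop gs 0 _ hnn, a_core]
  have hcfun : (fun k => ((PySem.Dict.counter rs).getD k 0).toNat)
      = fun k => ((rs : Multiset String)).count k := by
    funext k
    rw [PySem.Dict.getD_counter]
    simp [Multiset.coe_count]
  rw [hcfun, bLoop_eq_card gs (rs : Multiset String), Multiset.inter_comm]
  simp

-- ===== VERDICT (by name: the statement is the Claim_ definition above) =====
theorem calculate_ngram_overlap_spec : Claim_equal_calculate_ngram_overlap := by
  intro reference generated n _hdom
  unfold Spec_calculate_ngram_overlap calculate_ngram_overlap calculate_ngram_overlap_alt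
  simp only [PySem.Dict.keys_counter, PySem.Set.ofList_ofList, PySem.Dict.getD_counter]
  exact core_eq (extract_ngrams reference n) (extract_ngrams generated n)
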